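-- pv_equiv track=rewrite | github.com/adibirzu/octo-apm-demo | server/observability/correlation.py | infer_page_identity
-- ===== SOURCE A (Python) =====
-- _PAGE_RULES: tuple[tuple[str, str, str], ...] = (
--     ("/", "dashboard", "dashboard"),
--     ("/shop", "shop", "shop"),
--     ("/services", "services", "services"),
--     ("/catalogue", "catalogue", "catalogue"),
--     ("/orders", "orders", "orders"),
--     ("/shipping", "shipping", "shipping"),
--     ("/campaigns", "campaigns", "campaigns"),
--     ("/analytics", "analytics", "analytics"),
--     ("/admin", "admin", "admin"),
--     ("/login", "login", "auth"),
--     ("/api/products", "catalogue", "catalogue"),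
--     ("/api/orders", "orders", "orders"),
--     ("/api/shipping", "shipping", "shipping"),
--     ("/api/campaigns", "campaigns", "campaigns"),
--     ("/api/analytics", "analytics", "analytics"),
--     ("/api/admin", "admin", "admin"),
--     ("/api/shop", "shop", "shop"),
--     ("/api/services", "services", "services"),
--     ("/api/auth", "login", "auth"),
--     ("/ready", "readiness", "health"),
--     ("/health", "health", "health"),
-- )
--
-- def infer_page_identity(path: str) -> tuple[str, str]:
--     """Best-effort mapping from path to page + module names."""
--     normalized = path or "/"
--     if normalized != "/":
--         normalized = normalized.rstrip("/")
--     for prefix, page_name, module_name in _PAGE_RULES: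
--         if normalized == prefix or normalized.startswith(f"{prefix}/"):
--             return page_name, module_name
--     return "unknown", "unknown"
-- ===== SOURCE B (Python) =====
-- # B: one hash lookup on the reconstructed one-/two-segment prefix of the normalized
-- # path, instead of a linear startswith scan over a rule table.
-- _PAGE_LOOKUP = {
--     "/": ("dashboard", "dashboard"),
--     "/shop": ("shop", "shop"),
--     "/services": ("services", "services"),
--     "/catalogue": ("catalogue", "catalogue"),
--     "/orders": ("orders", "orders"),
--     "/shipping": ("shipping", "shipping"),
--     "/campaigns": ("campaigns", "campaigns"),
--     "/analytics": ("analytics", "analytics"),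
--     "/admin": ("admin", "admin"),
--     "/login": ("login", "auth"),
--     "/api/products": ("catalogue", "catalogue"),
--     "/api/orders": ("orders", "orders"),
--     "/api/shipping": ("shipping", "shipping"),
--     "/api/campaigns": ("campaigns", "campaigns"),
--     "/api/analytics": ("analytics", "analytics"),
--     "/api/admin": ("admin", "admin"),
--     "/api/shop": ("shop", "shop"),
--     "/api/services": ("services", "services"),
--     "/api/auth": ("login", "auth"),
--     "/ready": ("readiness", "health"),
--     "/health": ("health", "health"),
-- }
--
--
-- def infer_page_identity(path: str) -> tuple[str, str]:
--     """Best-effort mapping from path to page + module names."""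
--     normalized = path or "/"
--     if normalized != "/":
--         normalized = normalized.rstrip("/")
--     if not normalized.startswith("/"):
--         return ("unknown", "unknown")
--     seg0, sep, rest = normalized[1:].partition("/")
--     if sep:
--         seg1 = rest.partition("/")[0]
--         hit = _PAGE_LOOKUP.get("/" + seg0 + "/" + seg1)
--         if hit is not None:
--             return hit
--     return _PAGE_LOOKUP.get("/" + seg0, ("unknown", "unknown"))
-- ===== Notes on version B (the rewrite author's own statement) =====
-- stated objective: alternative
-- what changed: Replaces the linear startswith scan over the 21-entry rule table by tokenizing the normalized path and doing at most two direct dict lookups on its reconstructed two-segment and one-segment prefixes.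
import Mathlib
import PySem

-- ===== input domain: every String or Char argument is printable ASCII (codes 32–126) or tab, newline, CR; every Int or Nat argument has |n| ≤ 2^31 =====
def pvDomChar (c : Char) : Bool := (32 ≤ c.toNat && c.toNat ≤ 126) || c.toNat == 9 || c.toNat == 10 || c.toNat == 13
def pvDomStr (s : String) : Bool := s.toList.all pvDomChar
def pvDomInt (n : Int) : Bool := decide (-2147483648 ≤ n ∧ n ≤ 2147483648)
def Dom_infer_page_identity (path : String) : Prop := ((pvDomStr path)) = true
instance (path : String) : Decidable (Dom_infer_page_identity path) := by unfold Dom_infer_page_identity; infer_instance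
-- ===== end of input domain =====

-- B tokenizes the normalized path and does at most two dict lookups on its reconstructed
-- two-/one-segment prefixes, instead of A's linear startswith scan over the rule table.

-- hand port of Python's s.rstrip("/") (drop all trailing '/' characters); exact, both Pythons call it
def pvRstripSlash (cs : List Char) : List Char := (cs.reverse.dropWhile (fun c => c == '/')).reverse

-- ===== PORT A =====
def pageRulesA : List (List Char × String × String) := [
    (['/'], "dashboard", "dashboard"),
    (['/', 's', 'h', 'o', 'p'], "shop", "shop"),
    (['/', 's', 'e', 'r', 'v', 'i', 'c', 'e', 's'], "services", "services"),
    (['/', 'c', 'a', 't', 'a', 'l', 'o', 'g', 'u', 'e'], "catalogue", "catalogue"),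
    (['/', 'o', 'r', 'd', 'e', 'r', 's'], "orders", "orders"),
    (['/', 's', 'h', 'i', 'p', 'p', 'i', 'n', 'g'], "shipping", "shipping"),
    (['/', 'c', 'a', 'm', 'p', 'a', 'i', 'g', 'n', 's'], "campaigns", "campaigns"),
    (['/', 'a', 'n', 'a', 'l', 'y', 't', 'i', 'c', 's'], "analytics", "analytics"),
    (['/', 'a', 'd', 'm', 'i', 'n'], "admin", "admin"),
    (['/', 'l', 'o', 'g', 'i', 'n'], "login", "auth"),
    (['/', 'a', 'p', 'i', '/', 'p', 'r', 'o', 'd', 'u', 'c', 't', 's'], "catalogue", "catalogue"),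
    (['/', 'a', 'p', 'i', '/', 'o', 'r', 'd', 'e', 'r', 's'], "orders", "orders"),
    (['/', 'a', 'p', 'i', '/', 's', 'h', 'i', 'p', 'p', 'i', 'n', 'g'], "shipping", "shipping"),
    (['/', 'a', 'p', 'i', '/', 'c', 'a', 'm', 'p', 'a', 'i', 'g', 'n', 's'], "campaigns", "campaigns"),
    (['/', 'a', 'p', 'i', '/', 'a', 'n', 'a', 'l', 'y', 't', 'i', 'c', 's'], "analytics", "analytics"),
    (['/', 'a', 'p', 'i', '/', 'a', 'd', 'm', 'i', 'n'], "admin", "admin"),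
    (['/', 'a', 'p', 'i', '/', 's', 'h', 'o', 'p'], "shop", "shop"),
    (['/', 'a', 'p', 'i', '/', 's', 'e', 'r', 'v', 'i', 'c', 'e', 's'], "services", "services"),
    (['/', 'a', 'p', 'i', '/', 'a', 'u', 't', 'h'], "login", "auth"),
    (['/', 'r', 'e', 'a', 'd', 'y'], "readiness", "health"),
    (['/', 'h', 'e', 'a', 'l', 't', 'h'], "health", "health")]

def scanRulesA : List (List Char × String × String) → List Char → String × String
  | [], _ => ("unknown", "unknown")
  | (pre, pg, md) :: rest, n =>
      if n == pre || PySem.Chars.startswith n (pre ++ ['/']) then (pg, md)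
      else scanRulesA rest n

def infer_page_identity (path : String) : String × String :=
  let l := path.toList
  let n0 := if l.isEmpty then ['/'] else l
  let n := if n0 == ['/'] then n0 else pvRstripSlash n0
  scanRulesA pageRulesA n

-- ===== PORT B =====
def pageTableB : List (List Char × (String × String)) := [
    ("/".toList, ("dashboard", "dashboard")),
    ("/shop".toList, ("shop", "shop")),
    ("/services".toList, ("services", "services")),
    ("/catalogue".toList, ("catalogue", "catalogue")),
    ("/orders".toList, ("orders", "orders")),
    ("/shipping".toList, ("shipping", "shipping")),
    ("/campaigns".toList, ("campaigns", "campaigns")),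
    ("/analytics".toList, ("analytics", "analytics")),
    ("/admin".toList, ("admin", "admin")),
    ("/login".toList, ("login", "auth")),
    ("/api/products".toList, ("catalogue", "catalogue")),
    ("/api/orders".toList, ("orders", "orders")),
    ("/api/shipping".toList, ("shipping", "shipping")),
    ("/api/campaigns".toList, ("campaigns", "campaigns")),
    ("/api/analytics".toList, ("analytics", "analytics")),
    ("/api/admin".toList, ("admin", "admin")),
    ("/api/shop".toList, ("shop", "shop")),
    ("/api/services".toList, ("services", "services")),
    ("/api/auth".toList, ("login", "auth")),
    ("/ready".toList, ("readiness", "health")),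
    ("/health".toList, ("health", "health"))]

def pageLookupB : PySem.Dict (List Char) (String × String) := PySem.Dict.ofList pageTableB

def infer_page_identity_alt (path : String) : String × String :=
  let l := path.toList
  let n0 := if l.isEmpty then ['/'] else l
  let n := if n0 == ['/'] then n0 else pvRstripSlash n0
  if !(PySem.Chars.startswith n ['/']) then ("unknown", "unknown")
  else
    -- seg0, sep, rest = normalized[1:].partition("/")  (hand port, exact for the 1-char separator)
    let t := n.drop 1
    let seg0 := t.takeWhile (fun c => c != '/')
    let rest := t.dropWhile (fun c => c != '/')
    let hit := if !rest.isEmpty then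
        pageLookupB.get? (('/' :: seg0) ++ ('/' :: ((rest.drop 1).takeWhile (fun c => c != '/'))))
      else none
    -- "if hit is not None: return hit / return lookup.get(key1, default)"
    hit.getD ((pageLookupB.get? ('/' :: seg0)).getD ("unknown", "unknown"))

-- ===== PRECONDITION & SPEC =====
def Spec_infer_page_identity (path : String) (out : String × String) : Prop := out = infer_page_identity_alt path
instance (path : String) (out : String × String) : Decidable (Spec_infer_page_identity path out) := by unfold Spec_infer_page_identity; infer_instance

-- ===== CLAIM (what is proved, stated in full; the proofs are below) =====
def Claim_equal_infer_page_identity : Prop := ∀ (path : String), Dom_infer_page_identity path → Spec_infer_page_identity path (infer_page_identity path)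

-- ===== LEMMAS AND PROOFS =====

theorem pageLookupB_mk : pageLookupB = PySem.Dict.mk pageTableB := by rfl

theorem pageTableB_expand : pageTableB = [
    (['/'], ("dashboard", "dashboard")),
    (['/', 's', 'h', 'o', 'p'], ("shop", "shop")),
    (['/', 's', 'e', 'r', 'v', 'i', 'c', 'e', 's'], ("services", "services")),
    (['/', 'c', 'a', 't', 'a', 'l', 'o', 'g', 'u', 'e'], ("catalogue", "catalogue")),
    (['/', 'o', 'r', 'd', 'e', 'r', 's'], ("orders", "orders")),
    (['/', 's', 'h', 'i', 'p', 'p', 'i', 'n', 'g'], ("shipping", "shipping")),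
    (['/', 'c', 'a', 'm', 'p', 'a', 'i', 'g', 'n', 's'], ("campaigns", "campaigns")),
    (['/', 'a', 'n', 'a', 'l', 'y', 't', 'i', 'c', 's'], ("analytics", "analytics")),
    (['/', 'a', 'd', 'm', 'i', 'n'], ("admin", "admin")),
    (['/', 'l', 'o', 'g', 'i', 'n'], ("login", "auth")),
    (['/', 'a', 'p', 'i', '/', 'p', 'r', 'o', 'd', 'u', 'c', 't', 's'], ("catalogue", "catalogue")),
    (['/', 'a', 'p', 'i', '/', 'o', 'r', 'd', 'e', 'r', 's'], ("orders", "orders")),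
    (['/', 'a', 'p', 'i', '/', 's', 'h', 'i', 'p', 'p', 'i', 'n', 'g'], ("shipping", "shipping")),
    (['/', 'a', 'p', 'i', '/', 'c', 'a', 'm', 'p', 'a', 'i', 'g', 'n', 's'], ("campaigns", "campaigns")),
    (['/', 'a', 'p', 'i', '/', 'a', 'n', 'a', 'l', 'y', 't', 'i', 'c', 's'], ("analytics", "analytics")),
    (['/', 'a', 'p', 'i', '/', 'a', 'd', 'm', 'i', 'n'], ("admin", "admin")),
    (['/', 'a', 'p', 'i', '/', 's', 'h', 'o', 'p'], ("shop", "shop")),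
    (['/', 'a', 'p', 'i', '/', 's', 'e', 'r', 'v', 'i', 'c', 'e', 's'], ("services", "services")),
    (['/', 'a', 'p', 'i', '/', 'a', 'u', 't', 'h'], ("login", "auth")),
    (['/', 'r', 'e', 'a', 'd', 'y'], ("readiness", "health")),
    (['/', 'h', 'e', 'a', 'l', 't', 'h'], ("health", "health"))] := by decide

theorem pv_get?_nil (k : List Char) :
    (PySem.Dict.mk ([] : List (List Char × (String × String)))).get? k = none := by
  simp [PySem.Dict.get?]

theorem pv_bool_eq {a b : Bool} (h : a = true ↔ b = true) : a = b := by
  cases a <;> cases b <;> simp_all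

theorem pv_getD_ite {α : Type} (p : Prop) [inst : Decidable p] (x : α) (r : Option α) (d : α) :
    (if p then some x else r).getD d = if p then x else r.getD d := by
  by_cases h : p <;> simp [h]

theorem pv_not_isEmpty {α : Type} (l : List α) : (!l.isEmpty) = true ↔ l ≠ [] := by
  cases l <;> simp

theorem pv_dropW_head {u : List Char} {a : Char} {v : List Char}
    (h : u.dropWhile (fun c => c != '/') = a :: v) : a = '/' := by
  induction u with
  | nil => simp at h
  | cons b t ih =>
    rw [List.dropWhile_cons] at h
    by_cases hb : (b != '/') = true
    · rw [if_pos hb] at h; exact ih h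
    · rw [if_neg hb] at h
      injection h with h1 _
      subst h1
      simpa using hb

theorem pv_takeW_app (w v : List Char) (hw : ∀ a ∈ w, (a != '/') = true) :
    (w ++ '/' :: v).takeWhile (fun c => c != '/') = w := by
  induction w with
  | nil => simp
  | cons b t ih =>
    have hb := hw b (by simp)
    simp [hb, ih (fun a ha => hw a (by simp [ha]))]

theorem pv_dropW_app (w v : List Char) (hw : ∀ a ∈ w, (a != '/') = true) :
    (w ++ '/' :: v).dropWhile (fun c => c != '/') = '/' :: v := by
  induction w with
  | nil => simp
  | cons b t ih =>
    have hb := hw b (by simp)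
    simp [hb, ih (fun a ha => hw a (by simp [ha]))]

theorem pv_cond1_prop (u w : List Char) (hw : ∀ a ∈ w, (a != '/') = true) :
    (u = w ∨ (w ++ ['/']) <+: u) ↔ u.takeWhile (fun c => c != '/') = w := by
  constructor
  · rintro (rfl | ⟨v, hv⟩)
    · exact List.takeWhile_eq_self_iff.mpr hw
    · rw [← hv]
      simpa [List.append_assoc] using pv_takeW_app w v hw
  · intro h
    rcases hdw : u.dropWhile (fun c => c != '/') with _ | ⟨a, v⟩
    · left
      conv_lhs => rw [← List.takeWhile_append_dropWhile (p := fun c => c != '/') (l := u)]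
      rw [h, hdw, List.append_nil]
    · right
      have ha := pv_dropW_head hdw
      refine ⟨v, ?_⟩
      conv_rhs => rw [← List.takeWhile_append_dropWhile (p := fun c => c != '/') (l := u)]
      rw [h, hdw, ha]
      simp

theorem pv_cond2_prop (u w1 w2 : List Char) (h1 : ∀ a ∈ w1, (a != '/') = true)
    (h2 : ∀ a ∈ w2, (a != '/') = true) :
    (u = (w1 ++ '/' :: w2) ∨ ((w1 ++ '/' :: w2) ++ ['/']) <+: u) ↔
      (u.takeWhile (fun c => c != '/') = w1 ∧ u.dropWhile (fun c => c != '/') ≠ [] ∧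
       ((u.dropWhile (fun c => c != '/')).drop 1).takeWhile (fun c => c != '/') = w2) := by
  constructor
  · rintro (rfl | ⟨v, hv⟩)
    · refine ⟨pv_takeW_app w1 w2 h1, ?_, ?_⟩
      · rw [pv_dropW_app w1 w2 h1]; simp
      · rw [pv_dropW_app w1 w2 h1]
        simpa using List.takeWhile_eq_self_iff.mpr h2
    · have hu : u = w1 ++ '/' :: (w2 ++ '/' :: v) := by rw [← hv]; simp
      subst hu
      refine ⟨pv_takeW_app _ _ h1, ?_, ?_⟩
      · rw [pv_dropW_app _ _ h1]; simp
      · rw [pv_dropW_app _ _ h1]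
        simpa using pv_takeW_app w2 v h2
  · rintro ⟨ht, hne, ht2⟩
    rcases hdw : u.dropWhile (fun c => c != '/') with _ | ⟨a, v⟩
    · exact absurd hdw hne
    · have ha := pv_dropW_head hdw
      subst ha
      have hu : u = w1 ++ '/' :: v := by
        conv_lhs => rw [← List.takeWhile_append_dropWhile (p := fun c => c != '/') (l := u)]
        rw [ht, hdw]
      rw [hdw] at ht2
      simp only [List.drop_succ_cons, List.drop_zero] at ht2
      rcases (pv_cond1_prop v w2 h2).mpr ht2 with hv2 | ⟨x, hx⟩
      · left; rw [hu, hv2]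
      · right
        refine ⟨x, ?_⟩
        rw [hu, ← hx]
        simp

theorem pv_cond1 (u w : List Char) (hw : ∀ a ∈ w, (a != '/') = true) :
    (u == w || PySem.Chars.startswith u (w ++ ['/'])) = (u.takeWhile (fun c => c != '/') == w) := by
  apply pv_bool_eq
  simp only [Bool.or_eq_true, beq_iff_eq, PySem.Chars.startswith_iff]
  exact pv_cond1_prop u w hw

theorem pv_cond2 (u w1 w2 : List Char) (h1 : ∀ a ∈ w1, (a != '/') = true)
    (h2 : ∀ a ∈ w2, (a != '/') = true) :
    (u == (w1 ++ '/' :: w2) || PySem.Chars.startswith u ((w1 ++ '/' :: w2) ++ ['/'])) =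
      (u.takeWhile (fun c => c != '/') == w1 && (!(u.dropWhile (fun c => c != '/')).isEmpty &&
       (((u.dropWhile (fun c => c != '/')).drop 1).takeWhile (fun c => c != '/') == w2))) := by
  apply pv_bool_eq
  simp only [Bool.or_eq_true, Bool.and_eq_true, beq_iff_eq, PySem.Chars.startswith_iff,
    pv_not_isEmpty]
  exact pv_cond2_prop u w1 w2 h1 h2

theorem pv_condNoSw {c : Char} (t p : List Char) (hc : ¬ c = '/') :
    PySem.Chars.startswith (c :: t) ('/' :: p) = false := by
  rw [Bool.eq_false_iff]
  intro hcon
  rw [PySem.Chars.startswith_iff, List.cons_prefix_cons] at hcon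
  exact hc hcon.1.symm

theorem pv_key1_1 (s0 w : List Char) : (('/' :: w : List Char) == ('/' :: s0)) = (s0 == w) := by
  apply pv_bool_eq
  simp only [beq_iff_eq, List.cons.injEq, true_and]
  exact eq_comm

theorem pv_key1_2 (s0 w1 w2 : List Char) (hs0 : ∀ a ∈ s0, (a != '/') = true) :
    (('/' :: (w1 ++ '/' :: w2) : List Char) == ('/' :: s0)) = false := by
  apply beq_eq_false_iff_ne.mpr
  intro hc
  injection hc with _ h
  have hm : ('/' : Char) ∈ s0 := by rw [← h]; simp
  simpa using hs0 '/' hm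

theorem pv_key2_1 (s0 s1 w : List Char) (hw : ∀ a ∈ w, (a != '/') = true) :
    (('/' :: w : List Char) == ('/' :: (s0 ++ '/' :: s1))) = false := by
  apply beq_eq_false_iff_ne.mpr
  intro hc
  injection hc with _ h
  have hm : ('/' : Char) ∈ w := by rw [h]; simp
  simpa using hw '/' hm

theorem pv_key2_2 (s0 s1 w1 w2 : List Char) (hs0 : ∀ a ∈ s0, (a != '/') = true)
    (hw1 : ∀ a ∈ w1, (a != '/') = true) :
    (('/' :: (w1 ++ '/' :: w2) : List Char) == ('/' :: (s0 ++ '/' :: s1))) = (s0 == w1 && s1 == w2) := by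
  apply pv_bool_eq
  simp only [beq_iff_eq, Bool.and_eq_true, List.cons.injEq, true_and]
  constructor
  · intro hc
    have h0 : w1 = s0 := by
      have t1 := pv_takeW_app w1 w2 hw1
      rw [hc, pv_takeW_app s0 s1 hs0] at t1
      exact t1.symm
    subst h0
    have h2 := List.append_cancel_left hc
    injection h2 with _ h3
    exact ⟨rfl, h3.symm⟩
  · rintro ⟨h0, h1⟩
    rw [h0, h1]

theorem pv_beq_flip (a b : List Char) : (a == b) = (b == a) := by
  apply pv_bool_eq
  simp only [beq_iff_eq]
  exact eq_comm

theorem pv_sw_cons (a : Char) (u p : List Char) :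
    PySem.Chars.startswith (a :: u) (a :: p) = PySem.Chars.startswith u p := by
  apply pv_bool_eq
  rw [PySem.Chars.startswith_iff, PySem.Chars.startswith_iff]
  simp [List.cons_prefix_cons]

theorem pv_ruleB1 (d : Char) (t' w : List Char) (hfree : ∀ a ∈ w, (a != '/') = true) :
    (w == d :: t' || PySem.Chars.startswith ('/' :: d :: t') ('/' :: (w ++ ['/']))) =
      (List.takeWhile (fun c => c != '/') (d :: t') == w) := by
  rw [pv_beq_flip, pv_sw_cons, pv_cond1 (d :: t') w hfree]

theorem pv_ruleB2 (d : Char) (t' w1 w2 : List Char) (h1 : ∀ a ∈ w1, (a != '/') = true)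
    (h2 : ∀ a ∈ w2, (a != '/') = true) :
    ((w1 ++ '/' :: w2) == d :: t' ||
      PySem.Chars.startswith ('/' :: d :: t') ('/' :: ((w1 ++ '/' :: w2) ++ ['/']))) =
      (List.takeWhile (fun c => c != '/') (d :: t') == w1 &&
        (!(List.dropWhile (fun c => c != '/') (d :: t')).isEmpty &&
         (List.takeWhile (fun c => c != '/') (List.drop 1 (List.dropWhile (fun c => c != '/') (d :: t'))) == w2))) := by
  rw [pv_beq_flip, pv_sw_cons, pv_cond2 (d :: t') w1 w2 h1 h2]

set_option maxRecDepth 8192 in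
set_option maxHeartbeats 1000000 in
theorem cores_eq (n : List Char) :
    scanRulesA pageRulesA n =
    (if !(PySem.Chars.startswith n ['/']) then ("unknown", "unknown")
     else
       let t := n.drop 1
       let seg0 := t.takeWhile (fun c => c != '/')
       let rest := t.dropWhile (fun c => c != '/')
       let hit := if !rest.isEmpty then
           pageLookupB.get? (('/' :: seg0) ++ ('/' :: ((rest.drop 1).takeWhile (fun c => c != '/'))))
         else none
       hit.getD ((pageLookupB.get? ('/' :: seg0)).getD ("unknown", "unknown"))) := by
  rcases n with _ | ⟨c, t⟩
  · rfl
  · by_cases hc : c = '/'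
    · subst hc
      rcases t with _ | ⟨d, t'⟩
      · decide
      · by_cases hd : d = '/'
        · subst hd
          have hs : PySem.Chars.startswith ('/' :: '/' :: t') ['/', '/'] = true := by
            rw [PySem.Chars.startswith_iff]
            exact ⟨t', rfl⟩
          have hsw : PySem.Chars.startswith ('/' :: '/' :: t') ['/'] = true := by
            rw [PySem.Chars.startswith_iff]
            exact ⟨'/' :: t', rfl⟩
          simp only [scanRulesA, pageRulesA, List.cons_append, List.nil_append, hs,
            Bool.or_true, if_true, hsw, Bool.not_true, Bool.false_eq_true, if_false]
          simp only [List.drop_succ_cons, List.drop_zero, List.takeWhile_cons, List.dropWhile_cons]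
          simp [pageLookupB_mk, pageTableB_expand, PySem.Dict.get?]
        · -- main case: normalized path '/'::d::t' with d ≠ '/'
          have hdt : ∀ a ∈ (d :: t').takeWhile (fun c => c != '/'), (a != '/') = true :=
            fun a ha => List.mem_takeWhile_imp (p := fun c => c != '/') ha
          have hdb : (d != '/') = true := by simpa using hd
          have hne1 : (('/' :: d :: t' : List Char) == ['/']) = false := by
            apply beq_eq_false_iff_ne.mpr
            simp
          have hne2 : PySem.Chars.startswith ('/' :: d :: t') ['/', '/'] = false := by
            rw [Bool.eq_false_iff]
            intro hcon
            rw [PySem.Chars.startswith_iff, List.cons_prefix_cons] at hcon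
            obtain ⟨-, hcon⟩ := hcon
            rw [List.cons_prefix_cons] at hcon
            exact hd hcon.1.symm
          have hsw : PySem.Chars.startswith ('/' :: d :: t') ['/'] = true := by
            rw [PySem.Chars.startswith_iff]
            exact ⟨d :: t', rfl⟩
          have hS0ne : (((d :: t').takeWhile (fun c => c != '/')) == ([] : List Char)) = false := by
            simp [hdb]
          have csw_shop : ((['s', 'h', 'o', 'p'] : List Char) == d :: t' || PySem.Chars.startswith ('/' :: d :: t') ['/', 's', 'h', 'o', 'p', '/']) = ((List.takeWhile (fun c => c != '/') (d :: t')) == ['s', 'h', 'o', 'p']) := by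
            simpa only [List.cons_append, List.nil_append] using pv_ruleB1 d t' ['s', 'h', 'o', 'p'] (by simp)
          have csw_services : ((['s', 'e', 'r', 'v', 'i', 'c', 'e', 's'] : List Char) == d :: t' || PySem.Chars.startswith ('/' :: d :: t') ['/', 's', 'e', 'r', 'v', 'i', 'c', 'e', 's', '/']) = ((List.takeWhile (fun c => c != '/') (d :: t')) == ['s', 'e', 'r', 'v', 'i', 'c', 'e', 's']) := by
            simpa only [List.cons_append, List.nil_append] using pv_ruleB1 d t' ['s', 'e', 'r', 'v', 'i', 'c', 'e', 's'] (by simp)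
          have csw_catalogue : ((['c', 'a', 't', 'a', 'l', 'o', 'g', 'u', 'e'] : List Char) == d :: t' || PySem.Chars.startswith ('/' :: d :: t') ['/', 'c', 'a', 't', 'a', 'l', 'o', 'g', 'u', 'e', '/']) = ((List.takeWhile (fun c => c != '/') (d :: t')) == ['c', 'a', 't', 'a', 'l', 'o', 'g', 'u', 'e']) := by
            simpa only [List.cons_append, List.nil_append] using pv_ruleB1 d t' ['c', 'a', 't', 'a', 'l', 'o', 'g', 'u', 'e'] (by simp)
          have csw_orders : ((['o', 'r', 'd', 'e', 'r', 's'] : List Char) == d :: t' || PySem.Chars.startswith ('/' :: d :: t') ['/', 'o', 'r', 'd', 'e', 'r', 's', '/']) = ((List.takeWhile (fun c => c != '/') (d :: t')) == ['o', 'r', 'd', 'e', 'r', 's']) := by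
            simpa only [List.cons_append, List.nil_append] using pv_ruleB1 d t' ['o', 'r', 'd', 'e', 'r', 's'] (by simp)
          have csw_shipping : ((['s', 'h', 'i', 'p', 'p', 'i', 'n', 'g'] : List Char) == d :: t' || PySem.Chars.startswith ('/' :: d :: t') ['/', 's', 'h', 'i', 'p', 'p', 'i', 'n', 'g', '/']) = ((List.takeWhile (fun c => c != '/') (d :: t')) == ['s', 'h', 'i', 'p', 'p', 'i', 'n', 'g']) := by
            simpa only [List.cons_append, List.nil_append] using pv_ruleB1 d t' ['s', 'h', 'i', 'p', 'p', 'i', 'n', 'g'] (by simp)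
          have csw_campaigns : ((['c', 'a', 'm', 'p', 'a', 'i', 'g', 'n', 's'] : List Char) == d :: t' || PySem.Chars.startswith ('/' :: d :: t') ['/', 'c', 'a', 'm', 'p', 'a', 'i', 'g', 'n', 's', '/']) = ((List.takeWhile (fun c => c != '/') (d :: t')) == ['c', 'a', 'm', 'p', 'a', 'i', 'g', 'n', 's']) := by
            simpa only [List.cons_append, List.nil_append] using pv_ruleB1 d t' ['c', 'a', 'm', 'p', 'a', 'i', 'g', 'n', 's'] (by simp)
          have csw_analytics : ((['a', 'n', 'a', 'l', 'y', 't', 'i', 'c', 's'] : List Char) == d :: t' || PySem.Chars.startswith ('/' :: d :: t') ['/', 'a', 'n', 'a', 'l', 'y', 't', 'i', 'c', 's', '/']) = ((List.takeWhile (fun c => c != '/') (d :: t')) == ['a', 'n', 'a', 'l', 'y', 't', 'i', 'c', 's']) := by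
            simpa only [List.cons_append, List.nil_append] using pv_ruleB1 d t' ['a', 'n', 'a', 'l', 'y', 't', 'i', 'c', 's'] (by simp)
          have csw_admin : ((['a', 'd', 'm', 'i', 'n'] : List Char) == d :: t' || PySem.Chars.startswith ('/' :: d :: t') ['/', 'a', 'd', 'm', 'i', 'n', '/']) = ((List.takeWhile (fun c => c != '/') (d :: t')) == ['a', 'd', 'm', 'i', 'n']) := by
            simpa only [List.cons_append, List.nil_append] using pv_ruleB1 d t' ['a', 'd', 'm', 'i', 'n'] (by simp)
          have csw_login : ((['l', 'o', 'g', 'i', 'n'] : List Char) == d :: t' || PySem.Chars.startswith ('/' :: d :: t') ['/', 'l', 'o', 'g', 'i', 'n', '/']) = ((List.takeWhile (fun c => c != '/') (d :: t')) == ['l', 'o', 'g', 'i', 'n']) := by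
            simpa only [List.cons_append, List.nil_append] using pv_ruleB1 d t' ['l', 'o', 'g', 'i', 'n'] (by simp)
          have csw_api_products : ((['a', 'p', 'i', '/', 'p', 'r', 'o', 'd', 'u', 'c', 't', 's'] : List Char) == d :: t' || PySem.Chars.startswith ('/' :: d :: t') ['/', 'a', 'p', 'i', '/', 'p', 'r', 'o', 'd', 'u', 'c', 't', 's', '/']) = ((List.takeWhile (fun c => c != '/') (d :: t')) == ['a', 'p', 'i'] && (!(List.dropWhile (fun c => c != '/') (d :: t')).isEmpty && ((List.takeWhile (fun c => c != '/') (List.drop 1 (List.dropWhile (fun c => c != '/') (d :: t')))) == ['p', 'r', 'o', 'd', 'u', 'c', 't', 's']))) := by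
            simpa only [List.cons_append, List.nil_append] using pv_ruleB2 d t' ['a', 'p', 'i'] ['p', 'r', 'o', 'd', 'u', 'c', 't', 's'] (by simp) (by simp)
          have csw_api_orders : ((['a', 'p', 'i', '/', 'o', 'r', 'd', 'e', 'r', 's'] : List Char) == d :: t' || PySem.Chars.startswith ('/' :: d :: t') ['/', 'a', 'p', 'i', '/', 'o', 'r', 'd', 'e', 'r', 's', '/']) = ((List.takeWhile (fun c => c != '/') (d :: t')) == ['a', 'p', 'i'] && (!(List.dropWhile (fun c => c != '/') (d :: t')).isEmpty && ((List.takeWhile (fun c => c != '/') (List.drop 1 (List.dropWhile (fun c => c != '/') (d :: t')))) == ['o', 'r', 'd', 'e', 'r', 's']))) := by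
            simpa only [List.cons_append, List.nil_append] using pv_ruleB2 d t' ['a', 'p', 'i'] ['o', 'r', 'd', 'e', 'r', 's'] (by simp) (by simp)
          have csw_api_shipping : ((['a', 'p', 'i', '/', 's', 'h', 'i', 'p', 'p', 'i', 'n', 'g'] : List Char) == d :: t' || PySem.Chars.startswith ('/' :: d :: t') ['/', 'a', 'p', 'i', '/', 's', 'h', 'i', 'p', 'p', 'i', 'n', 'g', '/']) = ((List.takeWhile (fun c => c != '/') (d :: t')) == ['a', 'p', 'i'] && (!(List.dropWhile (fun c => c != '/') (d :: t')).isEmpty && ((List.takeWhile (fun c => c != '/') (List.drop 1 (List.dropWhile (fun c => c != '/') (d :: t')))) == ['s', 'h', 'i', 'p', 'p', 'i', 'n', 'g']))) := by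
            simpa only [List.cons_append, List.nil_append] using pv_ruleB2 d t' ['a', 'p', 'i'] ['s', 'h', 'i', 'p', 'p', 'i', 'n', 'g'] (by simp) (by simp)
          have csw_api_campaigns : ((['a', 'p', 'i', '/', 'c', 'a', 'm', 'p', 'a', 'i', 'g', 'n', 's'] : List Char) == d :: t' || PySem.Chars.startswith ('/' :: d :: t') ['/', 'a', 'p', 'i', '/', 'c', 'a', 'm', 'p', 'a', 'i', 'g', 'n', 's', '/']) = ((List.takeWhile (fun c => c != '/') (d :: t')) == ['a', 'p', 'i'] && (!(List.dropWhile (fun c => c != '/') (d :: t')).isEmpty && ((List.takeWhile (fun c => c != '/') (List.drop 1 (List.dropWhile (fun c => c != '/') (d :: t')))) == ['c', 'a', 'm', 'p', 'a', 'i', 'g', 'n', 's']))) := by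
            simpa only [List.cons_append, List.nil_append] using pv_ruleB2 d t' ['a', 'p', 'i'] ['c', 'a', 'm', 'p', 'a', 'i', 'g', 'n', 's'] (by simp) (by simp)
          have csw_api_analytics : ((['a', 'p', 'i', '/', 'a', 'n', 'a', 'l', 'y', 't', 'i', 'c', 's'] : List Char) == d :: t' || PySem.Chars.startswith ('/' :: d :: t') ['/', 'a', 'p', 'i', '/', 'a', 'n', 'a', 'l', 'y', 't', 'i', 'c', 's', '/']) = ((List.takeWhile (fun c => c != '/') (d :: t')) == ['a', 'p', 'i'] && (!(List.dropWhile (fun c => c != '/') (d :: t')).isEmpty && ((List.takeWhile (fun c => c != '/') (List.drop 1 (List.dropWhile (fun c => c != '/') (d :: t')))) == ['a', 'n', 'a', 'l', 'y', 't', 'i', 'c', 's']))) := by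
            simpa only [List.cons_append, List.nil_append] using pv_ruleB2 d t' ['a', 'p', 'i'] ['a', 'n', 'a', 'l', 'y', 't', 'i', 'c', 's'] (by simp) (by simp)
          have csw_api_admin : ((['a', 'p', 'i', '/', 'a', 'd', 'm', 'i', 'n'] : List Char) == d :: t' || PySem.Chars.startswith ('/' :: d :: t') ['/', 'a', 'p', 'i', '/', 'a', 'd', 'm', 'i', 'n', '/']) = ((List.takeWhile (fun c => c != '/') (d :: t')) == ['a', 'p', 'i'] && (!(List.dropWhile (fun c => c != '/') (d :: t')).isEmpty && ((List.takeWhile (fun c => c != '/') (List.drop 1 (List.dropWhile (fun c => c != '/') (d :: t')))) == ['a', 'd', 'm', 'i', 'n']))) := by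
            simpa only [List.cons_append, List.nil_append] using pv_ruleB2 d t' ['a', 'p', 'i'] ['a', 'd', 'm', 'i', 'n'] (by simp) (by simp)
          have csw_api_shop : ((['a', 'p', 'i', '/', 's', 'h', 'o', 'p'] : List Char) == d :: t' || PySem.Chars.startswith ('/' :: d :: t') ['/', 'a', 'p', 'i', '/', 's', 'h', 'o', 'p', '/']) = ((List.takeWhile (fun c => c != '/') (d :: t')) == ['a', 'p', 'i'] && (!(List.dropWhile (fun c => c != '/') (d :: t')).isEmpty && ((List.takeWhile (fun c => c != '/') (List.drop 1 (List.dropWhile (fun c => c != '/') (d :: t')))) == ['s', 'h', 'o', 'p']))) := by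
            simpa only [List.cons_append, List.nil_append] using pv_ruleB2 d t' ['a', 'p', 'i'] ['s', 'h', 'o', 'p'] (by simp) (by simp)
          have csw_api_services : ((['a', 'p', 'i', '/', 's', 'e', 'r', 'v', 'i', 'c', 'e', 's'] : List Char) == d :: t' || PySem.Chars.startswith ('/' :: d :: t') ['/', 'a', 'p', 'i', '/', 's', 'e', 'r', 'v', 'i', 'c', 'e', 's', '/']) = ((List.takeWhile (fun c => c != '/') (d :: t')) == ['a', 'p', 'i'] && (!(List.dropWhile (fun c => c != '/') (d :: t')).isEmpty && ((List.takeWhile (fun c => c != '/') (List.drop 1 (List.dropWhile (fun c => c != '/') (d :: t')))) == ['s', 'e', 'r', 'v', 'i', 'c', 'e', 's']))) := by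
            simpa only [List.cons_append, List.nil_append] using pv_ruleB2 d t' ['a', 'p', 'i'] ['s', 'e', 'r', 'v', 'i', 'c', 'e', 's'] (by simp) (by simp)
          have csw_api_auth : ((['a', 'p', 'i', '/', 'a', 'u', 't', 'h'] : List Char) == d :: t' || PySem.Chars.startswith ('/' :: d :: t') ['/', 'a', 'p', 'i', '/', 'a', 'u', 't', 'h', '/']) = ((List.takeWhile (fun c => c != '/') (d :: t')) == ['a', 'p', 'i'] && (!(List.dropWhile (fun c => c != '/') (d :: t')).isEmpty && ((List.takeWhile (fun c => c != '/') (List.drop 1 (List.dropWhile (fun c => c != '/') (d :: t')))) == ['a', 'u', 't', 'h']))) := by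
            simpa only [List.cons_append, List.nil_append] using pv_ruleB2 d t' ['a', 'p', 'i'] ['a', 'u', 't', 'h'] (by simp) (by simp)
          have csw_ready : ((['r', 'e', 'a', 'd', 'y'] : List Char) == d :: t' || PySem.Chars.startswith ('/' :: d :: t') ['/', 'r', 'e', 'a', 'd', 'y', '/']) = ((List.takeWhile (fun c => c != '/') (d :: t')) == ['r', 'e', 'a', 'd', 'y']) := by
            simpa only [List.cons_append, List.nil_append] using pv_ruleB1 d t' ['r', 'e', 'a', 'd', 'y'] (by simp)
          have csw_health : ((['h', 'e', 'a', 'l', 't', 'h'] : List Char) == d :: t' || PySem.Chars.startswith ('/' :: d :: t') ['/', 'h', 'e', 'a', 'l', 't', 'h', '/']) = ((List.takeWhile (fun c => c != '/') (d :: t')) == ['h', 'e', 'a', 'l', 't', 'h']) := by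
            simpa only [List.cons_append, List.nil_append] using pv_ruleB1 d t' ['h', 'e', 'a', 'l', 't', 'h'] (by simp)
          have kta_root : ((['/'] : List Char) == '/' :: (((d :: t').takeWhile (fun c => c != '/')) ++ '/' :: ((((d :: t').dropWhile (fun c => c != '/')).drop 1).takeWhile (fun c => c != '/')))) = false :=
            pv_key2_1 ((d :: t').takeWhile (fun c => c != '/')) ((((d :: t').dropWhile (fun c => c != '/')).drop 1).takeWhile (fun c => c != '/')) [] (by simp)
          have kta_shop : ((['/', 's', 'h', 'o', 'p'] : List Char) == '/' :: (((d :: t').takeWhile (fun c => c != '/')) ++ '/' :: ((((d :: t').dropWhile (fun c => c != '/')).drop 1).takeWhile (fun c => c != '/')))) = false :=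
            pv_key2_1 ((d :: t').takeWhile (fun c => c != '/')) ((((d :: t').dropWhile (fun c => c != '/')).drop 1).takeWhile (fun c => c != '/')) ['s', 'h', 'o', 'p'] (by simp)
          have kta_services : ((['/', 's', 'e', 'r', 'v', 'i', 'c', 'e', 's'] : List Char) == '/' :: (((d :: t').takeWhile (fun c => c != '/')) ++ '/' :: ((((d :: t').dropWhile (fun c => c != '/')).drop 1).takeWhile (fun c => c != '/')))) = false :=
            pv_key2_1 ((d :: t').takeWhile (fun c => c != '/')) ((((d :: t').dropWhile (fun c => c != '/')).drop 1).takeWhile (fun c => c != '/')) ['s', 'e', 'r', 'v', 'i', 'c', 'e', 's'] (by simp)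
          have kta_catalogue : ((['/', 'c', 'a', 't', 'a', 'l', 'o', 'g', 'u', 'e'] : List Char) == '/' :: (((d :: t').takeWhile (fun c => c != '/')) ++ '/' :: ((((d :: t').dropWhile (fun c => c != '/')).drop 1).takeWhile (fun c => c != '/')))) = false :=
            pv_key2_1 ((d :: t').takeWhile (fun c => c != '/')) ((((d :: t').dropWhile (fun c => c != '/')).drop 1).takeWhile (fun c => c != '/')) ['c', 'a', 't', 'a', 'l', 'o', 'g', 'u', 'e'] (by simp)
          have kta_orders : ((['/', 'o', 'r', 'd', 'e', 'r', 's'] : List Char) == '/' :: (((d :: t').takeWhile (fun c => c != '/')) ++ '/' :: ((((d :: t').dropWhile (fun c => c != '/')).drop 1).takeWhile (fun c => c != '/')))) = false :=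
            pv_key2_1 ((d :: t').takeWhile (fun c => c != '/')) ((((d :: t').dropWhile (fun c => c != '/')).drop 1).takeWhile (fun c => c != '/')) ['o', 'r', 'd', 'e', 'r', 's'] (by simp)
          have kta_shipping : ((['/', 's', 'h', 'i', 'p', 'p', 'i', 'n', 'g'] : List Char) == '/' :: (((d :: t').takeWhile (fun c => c != '/')) ++ '/' :: ((((d :: t').dropWhile (fun c => c != '/')).drop 1).takeWhile (fun c => c != '/')))) = false :=
            pv_key2_1 ((d :: t').takeWhile (fun c => c != '/')) ((((d :: t').dropWhile (fun c => c != '/')).drop 1).takeWhile (fun c => c != '/')) ['s', 'h', 'i', 'p', 'p', 'i', 'n', 'g'] (by simp)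
          have kta_campaigns : ((['/', 'c', 'a', 'm', 'p', 'a', 'i', 'g', 'n', 's'] : List Char) == '/' :: (((d :: t').takeWhile (fun c => c != '/')) ++ '/' :: ((((d :: t').dropWhile (fun c => c != '/')).drop 1).takeWhile (fun c => c != '/')))) = false :=
            pv_key2_1 ((d :: t').takeWhile (fun c => c != '/')) ((((d :: t').dropWhile (fun c => c != '/')).drop 1).takeWhile (fun c => c != '/')) ['c', 'a', 'm', 'p', 'a', 'i', 'g', 'n', 's'] (by simp)
          have kta_analytics : ((['/', 'a', 'n', 'a', 'l', 'y', 't', 'i', 'c', 's'] : List Char) == '/' :: (((d :: t').takeWhile (fun c => c != '/')) ++ '/' :: ((((d :: t').dropWhile (fun c => c != '/')).drop 1).takeWhile (fun c => c != '/')))) = false :=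
            pv_key2_1 ((d :: t').takeWhile (fun c => c != '/')) ((((d :: t').dropWhile (fun c => c != '/')).drop 1).takeWhile (fun c => c != '/')) ['a', 'n', 'a', 'l', 'y', 't', 'i', 'c', 's'] (by simp)
          have kta_admin : ((['/', 'a', 'd', 'm', 'i', 'n'] : List Char) == '/' :: (((d :: t').takeWhile (fun c => c != '/')) ++ '/' :: ((((d :: t').dropWhile (fun c => c != '/')).drop 1).takeWhile (fun c => c != '/')))) = false :=
            pv_key2_1 ((d :: t').takeWhile (fun c => c != '/')) ((((d :: t').dropWhile (fun c => c != '/')).drop 1).takeWhile (fun c => c != '/')) ['a', 'd', 'm', 'i', 'n'] (by simp)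
          have kta_login : ((['/', 'l', 'o', 'g', 'i', 'n'] : List Char) == '/' :: (((d :: t').takeWhile (fun c => c != '/')) ++ '/' :: ((((d :: t').dropWhile (fun c => c != '/')).drop 1).takeWhile (fun c => c != '/')))) = false :=
            pv_key2_1 ((d :: t').takeWhile (fun c => c != '/')) ((((d :: t').dropWhile (fun c => c != '/')).drop 1).takeWhile (fun c => c != '/')) ['l', 'o', 'g', 'i', 'n'] (by simp)
          have ktb_api_products : ((['/', 'a', 'p', 'i', '/', 'p', 'r', 'o', 'd', 'u', 'c', 't', 's'] : List Char) == '/' :: (((d :: t').takeWhile (fun c => c != '/')) ++ '/' :: ((((d :: t').dropWhile (fun c => c != '/')).drop 1).takeWhile (fun c => c != '/')))) = (((d :: t').takeWhile (fun c => c != '/')) == ['a', 'p', 'i'] && ((((d :: t').dropWhile (fun c => c != '/')).drop 1).takeWhile (fun c => c != '/')) == ['p', 'r', 'o', 'd', 'u', 'c', 't', 's']) := by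
            simpa only [List.cons_append, List.nil_append] using pv_key2_2 ((d :: t').takeWhile (fun c => c != '/')) ((((d :: t').dropWhile (fun c => c != '/')).drop 1).takeWhile (fun c => c != '/')) ['a', 'p', 'i'] ['p', 'r', 'o', 'd', 'u', 'c', 't', 's'] hdt (by simp)
          have kob_api_products : ((['/', 'a', 'p', 'i', '/', 'p', 'r', 'o', 'd', 'u', 'c', 't', 's'] : List Char) == '/' :: ((d :: t').takeWhile (fun c => c != '/'))) = false := by
            simpa only [List.cons_append, List.nil_append] using pv_key1_2 ((d :: t').takeWhile (fun c => c != '/')) ['a', 'p', 'i'] ['p', 'r', 'o', 'd', 'u', 'c', 't', 's'] hdt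
          have ktb_api_orders : ((['/', 'a', 'p', 'i', '/', 'o', 'r', 'd', 'e', 'r', 's'] : List Char) == '/' :: (((d :: t').takeWhile (fun c => c != '/')) ++ '/' :: ((((d :: t').dropWhile (fun c => c != '/')).drop 1).takeWhile (fun c => c != '/')))) = (((d :: t').takeWhile (fun c => c != '/')) == ['a', 'p', 'i'] && ((((d :: t').dropWhile (fun c => c != '/')).drop 1).takeWhile (fun c => c != '/')) == ['o', 'r', 'd', 'e', 'r', 's']) := by
            simpa only [List.cons_append, List.nil_append] using pv_key2_2 ((d :: t').takeWhile (fun c => c != '/')) ((((d :: t').dropWhile (fun c => c != '/')).drop 1).takeWhile (fun c => c != '/')) ['a', 'p', 'i'] ['o', 'r', 'd', 'e', 'r', 's'] hdt (by simp)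
          have kob_api_orders : ((['/', 'a', 'p', 'i', '/', 'o', 'r', 'd', 'e', 'r', 's'] : List Char) == '/' :: ((d :: t').takeWhile (fun c => c != '/'))) = false := by
            simpa only [List.cons_append, List.nil_append] using pv_key1_2 ((d :: t').takeWhile (fun c => c != '/')) ['a', 'p', 'i'] ['o', 'r', 'd', 'e', 'r', 's'] hdt
          have ktb_api_shipping : ((['/', 'a', 'p', 'i', '/', 's', 'h', 'i', 'p', 'p', 'i', 'n', 'g'] : List Char) == '/' :: (((d :: t').takeWhile (fun c => c != '/')) ++ '/' :: ((((d :: t').dropWhile (fun c => c != '/')).drop 1).takeWhile (fun c => c != '/')))) = (((d :: t').takeWhile (fun c => c != '/')) == ['a', 'p', 'i'] && ((((d :: t').dropWhile (fun c => c != '/')).drop 1).takeWhile (fun c => c != '/')) == ['s', 'h', 'i', 'p', 'p', 'i', 'n', 'g']) := by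
            simpa only [List.cons_append, List.nil_append] using pv_key2_2 ((d :: t').takeWhile (fun c => c != '/')) ((((d :: t').dropWhile (fun c => c != '/')).drop 1).takeWhile (fun c => c != '/')) ['a', 'p', 'i'] ['s', 'h', 'i', 'p', 'p', 'i', 'n', 'g'] hdt (by simp)
          have kob_api_shipping : ((['/', 'a', 'p', 'i', '/', 's', 'h', 'i', 'p', 'p', 'i', 'n', 'g'] : List Char) == '/' :: ((d :: t').takeWhile (fun c => c != '/'))) = false := by
            simpa only [List.cons_append, List.nil_append] using pv_key1_2 ((d :: t').takeWhile (fun c => c != '/')) ['a', 'p', 'i'] ['s', 'h', 'i', 'p', 'p', 'i', 'n', 'g'] hdt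
          have ktb_api_campaigns : ((['/', 'a', 'p', 'i', '/', 'c', 'a', 'm', 'p', 'a', 'i', 'g', 'n', 's'] : List Char) == '/' :: (((d :: t').takeWhile (fun c => c != '/')) ++ '/' :: ((((d :: t').dropWhile (fun c => c != '/')).drop 1).takeWhile (fun c => c != '/')))) = (((d :: t').takeWhile (fun c => c != '/')) == ['a', 'p', 'i'] && ((((d :: t').dropWhile (fun c => c != '/')).drop 1).takeWhile (fun c => c != '/')) == ['c', 'a', 'm', 'p', 'a', 'i', 'g', 'n', 's']) := by
            simpa only [List.cons_append, List.nil_append] using pv_key2_2 ((d :: t').takeWhile (fun c => c != '/')) ((((d :: t').dropWhile (fun c => c != '/')).drop 1).takeWhile (fun c => c != '/')) ['a', 'p', 'i'] ['c', 'a', 'm', 'p', 'a', 'i', 'g', 'n', 's'] hdt (by simp)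
          have kob_api_campaigns : ((['/', 'a', 'p', 'i', '/', 'c', 'a', 'm', 'p', 'a', 'i', 'g', 'n', 's'] : List Char) == '/' :: ((d :: t').takeWhile (fun c => c != '/'))) = false := by
            simpa only [List.cons_append, List.nil_append] using pv_key1_2 ((d :: t').takeWhile (fun c => c != '/')) ['a', 'p', 'i'] ['c', 'a', 'm', 'p', 'a', 'i', 'g', 'n', 's'] hdt
          have ktb_api_analytics : ((['/', 'a', 'p', 'i', '/', 'a', 'n', 'a', 'l', 'y', 't', 'i', 'c', 's'] : List Char) == '/' :: (((d :: t').takeWhile (fun c => c != '/')) ++ '/' :: ((((d :: t').dropWhile (fun c => c != '/')).drop 1).takeWhile (fun c => c != '/')))) = (((d :: t').takeWhile (fun c => c != '/')) == ['a', 'p', 'i'] && ((((d :: t').dropWhile (fun c => c != '/')).drop 1).takeWhile (fun c => c != '/')) == ['a', 'n', 'a', 'l', 'y', 't', 'i', 'c', 's']) := by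
            simpa only [List.cons_append, List.nil_append] using pv_key2_2 ((d :: t').takeWhile (fun c => c != '/')) ((((d :: t').dropWhile (fun c => c != '/')).drop 1).takeWhile (fun c => c != '/')) ['a', 'p', 'i'] ['a', 'n', 'a', 'l', 'y', 't', 'i', 'c', 's'] hdt (by simp)
          have kob_api_analytics : ((['/', 'a', 'p', 'i', '/', 'a', 'n', 'a', 'l', 'y', 't', 'i', 'c', 's'] : List Char) == '/' :: ((d :: t').takeWhile (fun c => c != '/'))) = false := by
            simpa only [List.cons_append, List.nil_append] using pv_key1_2 ((d :: t').takeWhile (fun c => c != '/')) ['a', 'p', 'i'] ['a', 'n', 'a', 'l', 'y', 't', 'i', 'c', 's'] hdt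
          have ktb_api_admin : ((['/', 'a', 'p', 'i', '/', 'a', 'd', 'm', 'i', 'n'] : List Char) == '/' :: (((d :: t').takeWhile (fun c => c != '/')) ++ '/' :: ((((d :: t').dropWhile (fun c => c != '/')).drop 1).takeWhile (fun c => c != '/')))) = (((d :: t').takeWhile (fun c => c != '/')) == ['a', 'p', 'i'] && ((((d :: t').dropWhile (fun c => c != '/')).drop 1).takeWhile (fun c => c != '/')) == ['a', 'd', 'm', 'i', 'n']) := by
            simpa only [List.cons_append, List.nil_append] using pv_key2_2 ((d :: t').takeWhile (fun c => c != '/')) ((((d :: t').dropWhile (fun c => c != '/')).drop 1).takeWhile (fun c => c != '/')) ['a', 'p', 'i'] ['a', 'd', 'm', 'i', 'n'] hdt (by simp)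
          have kob_api_admin : ((['/', 'a', 'p', 'i', '/', 'a', 'd', 'm', 'i', 'n'] : List Char) == '/' :: ((d :: t').takeWhile (fun c => c != '/'))) = false := by
            simpa only [List.cons_append, List.nil_append] using pv_key1_2 ((d :: t').takeWhile (fun c => c != '/')) ['a', 'p', 'i'] ['a', 'd', 'm', 'i', 'n'] hdt
          have ktb_api_shop : ((['/', 'a', 'p', 'i', '/', 's', 'h', 'o', 'p'] : List Char) == '/' :: (((d :: t').takeWhile (fun c => c != '/')) ++ '/' :: ((((d :: t').dropWhile (fun c => c != '/')).drop 1).takeWhile (fun c => c != '/')))) = (((d :: t').takeWhile (fun c => c != '/')) == ['a', 'p', 'i'] && ((((d :: t').dropWhile (fun c => c != '/')).drop 1).takeWhile (fun c => c != '/')) == ['s', 'h', 'o', 'p']) := by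
            simpa only [List.cons_append, List.nil_append] using pv_key2_2 ((d :: t').takeWhile (fun c => c != '/')) ((((d :: t').dropWhile (fun c => c != '/')).drop 1).takeWhile (fun c => c != '/')) ['a', 'p', 'i'] ['s', 'h', 'o', 'p'] hdt (by simp)
          have kob_api_shop : ((['/', 'a', 'p', 'i', '/', 's', 'h', 'o', 'p'] : List Char) == '/' :: ((d :: t').takeWhile (fun c => c != '/'))) = false := by
            simpa only [List.cons_append, List.nil_append] using pv_key1_2 ((d :: t').takeWhile (fun c => c != '/')) ['a', 'p', 'i'] ['s', 'h', 'o', 'p'] hdt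
          have ktb_api_services : ((['/', 'a', 'p', 'i', '/', 's', 'e', 'r', 'v', 'i', 'c', 'e', 's'] : List Char) == '/' :: (((d :: t').takeWhile (fun c => c != '/')) ++ '/' :: ((((d :: t').dropWhile (fun c => c != '/')).drop 1).takeWhile (fun c => c != '/')))) = (((d :: t').takeWhile (fun c => c != '/')) == ['a', 'p', 'i'] && ((((d :: t').dropWhile (fun c => c != '/')).drop 1).takeWhile (fun c => c != '/')) == ['s', 'e', 'r', 'v', 'i', 'c', 'e', 's']) := by
            simpa only [List.cons_append, List.nil_append] using pv_key2_2 ((d :: t').takeWhile (fun c => c != '/')) ((((d :: t').dropWhile (fun c => c != '/')).drop 1).takeWhile (fun c => c != '/')) ['a', 'p', 'i'] ['s', 'e', 'r', 'v', 'i', 'c', 'e', 's'] hdt (by simp)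
          have kob_api_services : ((['/', 'a', 'p', 'i', '/', 's', 'e', 'r', 'v', 'i', 'c', 'e', 's'] : List Char) == '/' :: ((d :: t').takeWhile (fun c => c != '/'))) = false := by
            simpa only [List.cons_append, List.nil_append] using pv_key1_2 ((d :: t').takeWhile (fun c => c != '/')) ['a', 'p', 'i'] ['s', 'e', 'r', 'v', 'i', 'c', 'e', 's'] hdt
          have ktb_api_auth : ((['/', 'a', 'p', 'i', '/', 'a', 'u', 't', 'h'] : List Char) == '/' :: (((d :: t').takeWhile (fun c => c != '/')) ++ '/' :: ((((d :: t').dropWhile (fun c => c != '/')).drop 1).takeWhile (fun c => c != '/')))) = (((d :: t').takeWhile (fun c => c != '/')) == ['a', 'p', 'i'] && ((((d :: t').dropWhile (fun c => c != '/')).drop 1).takeWhile (fun c => c != '/')) == ['a', 'u', 't', 'h']) := by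
            simpa only [List.cons_append, List.nil_append] using pv_key2_2 ((d :: t').takeWhile (fun c => c != '/')) ((((d :: t').dropWhile (fun c => c != '/')).drop 1).takeWhile (fun c => c != '/')) ['a', 'p', 'i'] ['a', 'u', 't', 'h'] hdt (by simp)
          have kob_api_auth : ((['/', 'a', 'p', 'i', '/', 'a', 'u', 't', 'h'] : List Char) == '/' :: ((d :: t').takeWhile (fun c => c != '/'))) = false := by
            simpa only [List.cons_append, List.nil_append] using pv_key1_2 ((d :: t').takeWhile (fun c => c != '/')) ['a', 'p', 'i'] ['a', 'u', 't', 'h'] hdt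
          have kta_ready : ((['/', 'r', 'e', 'a', 'd', 'y'] : List Char) == '/' :: (((d :: t').takeWhile (fun c => c != '/')) ++ '/' :: ((((d :: t').dropWhile (fun c => c != '/')).drop 1).takeWhile (fun c => c != '/')))) = false :=
            pv_key2_1 ((d :: t').takeWhile (fun c => c != '/')) ((((d :: t').dropWhile (fun c => c != '/')).drop 1).takeWhile (fun c => c != '/')) ['r', 'e', 'a', 'd', 'y'] (by simp)
          have kta_health : ((['/', 'h', 'e', 'a', 'l', 't', 'h'] : List Char) == '/' :: (((d :: t').takeWhile (fun c => c != '/')) ++ '/' :: ((((d :: t').dropWhile (fun c => c != '/')).drop 1).takeWhile (fun c => c != '/')))) = false :=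
            pv_key2_1 ((d :: t').takeWhile (fun c => c != '/')) ((((d :: t').dropWhile (fun c => c != '/')).drop 1).takeWhile (fun c => c != '/')) ['h', 'e', 'a', 'l', 't', 'h'] (by simp)
          simp only [scanRulesA, pageRulesA, pageLookupB_mk, pageTableB_expand, PySem.Dict.get?_mk_cons,
            pv_get?_nil, List.cons_append, List.nil_append, List.drop_succ_cons, List.drop_zero]
          simp only [hne1, hne2, hsw, hS0ne, pv_key1_1, csw_shop, csw_services, csw_catalogue, csw_orders, csw_shipping, csw_campaigns, csw_analytics, csw_admin, csw_login, csw_api_products, csw_api_orders, csw_api_shipping, csw_api_campaigns, csw_api_analytics, csw_api_admin, csw_api_shop, csw_api_services, csw_api_auth, csw_ready, csw_health, kta_root, kta_shop, kta_services, kta_catalogue, kta_orders, kta_shipping, kta_campaigns, kta_analytics, kta_admin, kta_login, ktb_api_products, kob_api_products, ktb_api_orders, kob_api_orders, ktb_api_shipping, kob_api_shipping, ktb_api_campaigns, kob_api_campaigns, ktb_api_analytics, kob_api_analytics, ktb_api_admin, kob_api_admin, ktb_api_shop, kob_api_shop, ktb_api_services, kob_api_services, ktb_api_auth, kob_api_auth,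 kta_ready, kta_health]
          generalize ((d :: t').takeWhile (fun c => c != '/')) = S0
          generalize ((d :: t').dropWhile (fun c => c != '/')) = R
          rcases R with _ | ⟨a, v⟩
          · simp [pv_getD_ite]
          · by_cases hapi : S0 = ['a', 'p', 'i']
            · subst hapi
              simp [pv_getD_ite]
            · simp [pv_getD_ite, beq_eq_false_iff_ne.mpr hapi]
    · have hnosw : PySem.Chars.startswith (c :: t) ['/'] = false := pv_condNoSw t [] hc
      simp [scanRulesA, pageRulesA, List.cons_append, List.nil_append, pv_condNoSw, hc, hnosw]

-- ===== VERDICT (by name: the statement is the Claim_ definition above) =====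
theorem infer_page_identity_spec : Claim_equal_infer_page_identity := by
  intro path _
  unfold Spec_infer_page_identity infer_page_identity infer_page_identity_alt
  exact cores_eq _
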